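-- pv_equiv track=rewrite | github.com/notsocertain/technical-test--RAG | pipeline.py | _chunk_ids_to_sources_flat
-- ===== SOURCE A (Python) =====
-- from typing import List, Tuple, Dict, Any
-- from typing import List, Dict, Set, Tuple
--
-- def _chunk_ids_to_sources_flat(
--     ref_ids: List[str], results: List[Dict]
-- ) -> List[str]:
--     index = {r["chunk_id"]: r for r in results if r.get("chunk_id")}
--     out: List[str] = []
--     for rid in ref_ids:
--         r = index.get(rid)
--         if not r:
--             continue
--         label = r.get("document_name", "")
--         page = int(r.get("page_number", 0)) + 1
--         item = r.get("item_number") or ""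
--         out.extend([label, f"Item {item}" if item else "Item", f"p. {page}"])
--         break
--     return out
-- ===== SOURCE B (Python) =====
-- from typing import List, Dict
--
--
-- def _chunk_ids_to_sources_flat(
--     ref_ids: List[str], results: List[Dict]
-- ) -> List[str]:
--     # Single pass over results: pick the result whose chunk_id occurs earliest
--     # in ref_ids (argmin over ref position); on equal position the later result
--     # wins, which reproduces the dict-overwrite on duplicate chunk_ids.
--     best = None  # (position in ref_ids, result)
--     for r in results:
--         cid = r.get("chunk_id")
--         if not cid:
--             continue
--         try:
--             pos = ref_ids.index(cid)
--         except ValueError: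
--             continue
--         if best is None or pos <= best[0]:
--             best = (pos, r)
--     if best is None:
--         return []
--     r = best[1]
--     label = r.get("document_name", "")
--     page = int(r.get("page_number", 0)) + 1
--     item = r.get("item_number") or ""
--     return [label, f"Item {item}" if item else "Item", f"p. {page}"]
-- ===== Notes on version B (the rewrite author's own statement) =====
-- stated objective: alternative
-- what changed: B inverts the traversal: instead of indexing results by chunk_id and walking ref_ids until a hit, it makes one pass over results keeping the result whose chunk_id occurs earliest in ref_ids (argmin over ref position, later result wins ties to match dict overwrite) and formats that one.
import Mathlib
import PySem

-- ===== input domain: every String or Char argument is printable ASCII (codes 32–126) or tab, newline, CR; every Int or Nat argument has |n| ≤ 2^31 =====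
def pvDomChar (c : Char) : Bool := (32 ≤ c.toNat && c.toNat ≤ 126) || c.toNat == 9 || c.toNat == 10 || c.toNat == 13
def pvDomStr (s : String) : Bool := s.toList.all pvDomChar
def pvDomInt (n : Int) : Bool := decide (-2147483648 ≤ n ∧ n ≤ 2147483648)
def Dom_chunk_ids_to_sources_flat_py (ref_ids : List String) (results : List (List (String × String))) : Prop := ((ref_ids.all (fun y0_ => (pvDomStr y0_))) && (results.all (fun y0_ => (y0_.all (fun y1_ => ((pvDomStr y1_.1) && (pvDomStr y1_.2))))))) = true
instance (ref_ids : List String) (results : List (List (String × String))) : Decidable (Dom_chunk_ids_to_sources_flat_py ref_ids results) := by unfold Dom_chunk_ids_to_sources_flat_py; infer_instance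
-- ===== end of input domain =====

-- B replaces A's chunk_id→result index dict + walk over ref_ids by a single pass over
-- results keeping the result whose chunk_id occurs earliest in ref_ids (ties: later
-- result wins, = dict overwrite); same return value (objective: alternative).

-- ===== PORT A =====

-- r.get(k) on one result dict (assoc list, first match)
def pvGetS (r : List (String × String)) (k : String) : Option String :=
  PySem.Dict.get? (PySem.Dict.mk r) k

-- shared tail of both Pythons: [label, "Item …", "p. …"] from the chosen result r
-- (int(...) ported totally with getD 0; Pre_ excludes exactly the ValueError inputs)
def pvEntry (r : List (String × String)) : List String :=
  let label := (pvGetS r "document_name").getD ""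
  let page : Int := (match pvGetS r "page_number" with
                     | none => (0 : Int)
                     | some s => (PySem.Int.ofStr? s).getD 0) + 1
  let item := (pvGetS r "item_number").getD ""
  [label, if item ≠ "" then "Item " ++ item else "Item", "p. " ++ PySem.Int.toStr page]

-- index = {r["chunk_id"]: r for r in results if r.get("chunk_id")}
def pvIndexStep (d : PySem.Dict String (List (String × String))) (r : List (String × String)) :
    PySem.Dict String (List (String × String)) :=
  match pvGetS r "chunk_id" with
  | some c => if c ≠ "" then d.insert c r else d
  | none => d

-- the for-rid loop with its break
def pvLoopA (index : PySem.Dict String (List (String × String))) :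
    List String → List String
  | [] => []
  | rid :: rest =>
    match index.get? rid with
    | none => pvLoopA index rest
    | some r => if r = [] then pvLoopA index rest else pvEntry r

def chunk_ids_to_sources_flat_py (ref_ids : List String) (results : List (List (String × String))) : List String :=
  pvLoopA (results.foldl pvIndexStep PySem.Dict.empty) ref_ids

-- ===== PORT B =====

-- loop body of Source B: keep (pos, r) with the smallest ref_ids position, later wins ties
def pvBStep (ref_ids : List String)
    (st : Option (Nat × List (String × String))) (r : List (String × String)) :
    Option (Nat × List (String × String)) :=
  match pvGetS r "chunk_id" with
  | none => st
  | some cid =>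
    if cid = "" then st
    else
      match PySem.List.index? ref_ids cid with   -- ref_ids.index(cid), except ValueError → skip
      | none => st
      | some pos =>
        match st with
        | none => some (pos, r)
        | some (q, _) => if pos ≤ q then some (pos, r) else st

def chunk_ids_to_sources_flat_py_alt (ref_ids : List String) (results : List (List (String × String))) : List String :=
  match results.foldl (pvBStep ref_ids) none with
  | none => []
  | some (_, r) => pvEntry r

-- ===== PRECONDITION & SPEC =====

-- position in ref_ids of r's truthy chunk_id (none if absent, falsy, or not in ref_ids)
def pvTid (ref_ids : List String) (r : List (String × String)) : Option Nat :=
  match pvGetS r "chunk_id" with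
  | some c => if c = "" then none else PySem.List.index? ref_ids c
  | none => none

-- does int(page_number) parse (missing key defaults to the int 0)
def pvPageOk (r : List (String × String)) : Bool :=
  match pvGetS r "page_number" with
  | none => true
  | some s => (PySem.Int.ofStr? s).isSome

-- Pre_ excludes exactly the inputs on which A raises ValueError: the result A selects
-- (truthy chunk_id earliest in ref_ids, later result on ties) has a page_number that
-- int() cannot parse; B raises there too.
def Pre_chunk_ids_to_sources_flat_py (ref_ids : List String) (results : List (List (String × String))) : Prop :=
  ((List.range results.length).all (fun i =>
    match pvTid ref_ids (results.getD i []) with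
    | none => true
    | some p =>
      !((List.range results.length).all (fun j =>
          match pvTid ref_ids (results.getD j []) with
          | none => true
          | some q => decide (p < q) || (p == q && decide (j ≤ i))))
      || pvPageOk (results.getD i []))) = true
instance (ref_ids : List String) (results : List (List (String × String))) : Decidable (Pre_chunk_ids_to_sources_flat_py ref_ids results) := by unfold Pre_chunk_ids_to_sources_flat_py; infer_instance

def pvWitness_chunk_ids_to_sources_flat_py : List String × (List (List (String × String))) :=
  (["a"], [[("chunk_id", "a"), ("page_number", "3"), ("document_name", "Doc")]])

def Spec_chunk_ids_to_sources_flat_py (ref_ids : List String) (results : List (List (String × String))) (out : List String) : Prop := out = chunk_ids_to_sources_flat_py_alt ref_ids results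
instance (ref_ids : List String) (results : List (List (String × String))) (out : List String) : Decidable (Spec_chunk_ids_to_sources_flat_py ref_ids results out) := by unfold Spec_chunk_ids_to_sources_flat_py; infer_instance

-- ===== CLAIM =====
def Claim_equal_chunk_ids_to_sources_flat_py : Prop := ∀ (ref_ids : List String) (results : List (List (String × String))), Dom_chunk_ids_to_sources_flat_py ref_ids results → Pre_chunk_ids_to_sources_flat_py ref_ids results → Spec_chunk_ids_to_sources_flat_py ref_ids results (chunk_ids_to_sources_flat_py ref_ids results)

-- ===== LEMMAS AND PROOFS =====

-- proof-side mirror of A's per-rid selection: last result whose truthy chunk_id = rid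
def pvScanStep (rid : String) (acc : Option (List (String × String))) (cand : List (String × String)) :
    Option (List (String × String)) :=
  match pvGetS cand "chunk_id" with
  | some c => if c ≠ "" ∧ c = rid then some cand else acc
  | none => acc

-- A's selected result, expressed recursively over ref_ids
def pvSelA (results : List (List (String × String))) :
    List String → Option (List (String × String))
  | [] => none
  | rid :: rest =>
    match results.foldl (pvScanStep rid) none with
    | none => pvSelA results rest
    | some r => some r

-- the dict lookup into A's index equals the last-match scan
theorem pv_index_get_eq_scan (rid : String) :
    ∀ (results : List (List (String × String))) (d : PySem.Dict String (List (String × String))),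
      (results.foldl pvIndexStep d).get? rid = results.foldl (pvScanStep rid) (d.get? rid) := by
  intro results
  induction results with
  | nil => intro d; rfl
  | cons r rest ih =>
    intro d
    simp only [List.foldl_cons, ih]
    congr 1
    unfold pvIndexStep pvScanStep
    cases h : pvGetS r "chunk_id" with
    | none => rfl
    | some c =>
      dsimp only
      by_cases hc : c ≠ ""
      · rw [if_pos hc, PySem.Dict.get?_insert]
        by_cases hr : c = rid
        · subst hr; simp [hc]
        · have hne : rid ≠ c := fun h => hr h.symm
          rw [if_neg hne]; simp [hr]
      · simp at hc; simp [hc]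

-- whatever the scan returns is a nonempty assoc list (it has a chunk_id entry)
theorem pv_scan_ne_nil (rid : String) :
    ∀ (results : List (List (String × String))) (acc : Option (List (String × String))),
      (∀ r, acc = some r → r ≠ []) →
      ∀ r, results.foldl (pvScanStep rid) acc = some r → r ≠ [] := by
  intro results
  induction results with
  | nil => intro acc hacc r h; exact hacc r h
  | cons cand rest ih =>
    intro acc hacc r h
    refine ih (pvScanStep rid acc cand) ?_ r h
    intro r' hr'
    unfold pvScanStep at hr'
    cases hc : pvGetS cand "chunk_id" with
    | none => rw [hc] at hr'; exact hacc r' hr'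
    | some c =>
      rw [hc] at hr'
      dsimp only at hr'
      by_cases hcc : c ≠ "" ∧ c = rid
      · rw [if_pos hcc] at hr'
        injection hr' with hr''
        subst hr''
        intro hnil
        rw [hnil] at hc
        simp [pvGetS, PySem.Dict.get?] at hc
      · rw [if_neg hcc] at hr'
        exact hacc r' hr'

-- A = pvSelA-then-format
theorem pv_A_eq_selA (ref_ids : List String) (results : List (List (String × String))) :
    chunk_ids_to_sources_flat_py ref_ids results
      = match pvSelA results ref_ids with
        | none => []
        | some r => pvEntry r := by
  unfold chunk_ids_to_sources_flat_py
  induction ref_ids with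
  | nil => rfl
  | cons rid rest ih =>
    unfold pvLoopA pvSelA
    have hidx : (results.foldl pvIndexStep PySem.Dict.empty).get? rid
        = results.foldl (pvScanStep rid) none := by
      rw [pv_index_get_eq_scan]; rfl
    rw [hidx]
    cases h : results.foldl (pvScanStep rid) none with
    | none => exact ih
    | some r =>
      have hne : r ≠ [] := pv_scan_ne_nil rid results none (by intro r h; cases h) r h
      simp [hne]

-- shift of an accumulator when the head rid is prepended to ref_ids
def pvShift (st : Option (Nat × List (String × String))) : Option (Nat × List (String × String)) :=
  st.map (fun pr => (pr.1 + 1, pr.2))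

-- the three-state invariant tying the scan for the head rid, B's fold over rid::rest,
-- and B's fold over rest
def pvInv (_rid : String)
    (a : Option (List (String × String)))
    (st st' : Option (Nat × List (String × String))) : Prop :=
  match a with
  | some r => st = some (0, r)
  | none => st = pvShift st'

theorem pv_inv_fold (rid : String) (rest : List String) :
    ∀ (results : List (List (String × String)))
      (a : Option (List (String × String))) (st st' : Option (Nat × List (String × String))),
      pvInv rid a st st' →
      pvInv rid (results.foldl (pvScanStep rid) a)
        (results.foldl (pvBStep (rid :: rest)) st)
        (results.foldl (pvBStep rest) st') := by
  intro results
  induction results with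
  | nil => intro a st st' h; exact h
  | cons cand cs ih =>
    intro a st st' h
    refine ih _ _ _ ?_
    unfold pvScanStep pvBStep
    cases hc : pvGetS cand "chunk_id" with
    | none => exact h
    | some c =>
      dsimp only
      by_cases hce : c = ""
      · subst hce
        rw [if_pos (rfl : ("" : String) = ""), if_pos (rfl : ("" : String) = ""),
            if_neg (show ¬(("" : String) ≠ "" ∧ ("" : String) = rid) by simp)]
        exact h
      · rw [if_neg hce, if_neg hce]
        by_cases hcr : c = rid
        · subst hcr
          rw [if_pos ⟨hce, rfl⟩, PySem.List.index?_cons_self]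
          unfold pvInv
          unfold pvInv at h
          cases a with
          | some r =>
            rw [h]
            simp
          | none =>
            rw [h]
            cases st' with
            | none => rfl
            | some pr => simp [pvShift]
        · have : ¬(c ≠ "" ∧ c = rid) := fun ⟨_, h2⟩ => hcr h2
          rw [if_neg this, PySem.List.index?_cons_of_ne rest (Ne.symm hcr)]
          unfold pvInv at h ⊢
          cases a with
          | some r =>
            rw [h]
            cases hi : PySem.List.index? rest c with
            | none => rfl
            | some p => simp
          | none =>
            rw [h]
            cases hi : PySem.List.index? rest c with
            | none => rfl
            | some p =>
              simp only [Option.map_some]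
              cases st' with
              | none => rfl
              | some pr =>
                obtain ⟨q, r⟩ := pr
                simp only [pvShift, Option.map_some]
                by_cases hpq : p ≤ q
                · rw [if_pos hpq, if_pos (by omega)]
                  rfl
                · rw [if_neg hpq, if_neg (by omega)]
                  rfl

-- B's fold with empty ref_ids never picks anything
theorem pv_fold_nil_ref :
    ∀ (results : List (List (String × String))) (st : Option (Nat × List (String × String))),
      results.foldl (pvBStep []) st = st := by
  intro results
  induction results with
  | nil => intro st; rfl
  | cons cand cs ih =>
    intro st
    rw [List.foldl_cons, show pvBStep [] st cand = st from ?_]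
    · exact ih st
    · unfold pvBStep
      cases pvGetS cand "chunk_id" with
      | none => rfl
      | some c =>
        dsimp only
        by_cases hce : c = ""
        · rw [if_pos hce]
        · rw [if_neg hce]
          have : PySem.List.index? ([] : List String) c = none := by
            rw [PySem.List.index?_eq_none_iff]; simp
          rw [this]

-- A's selection = B's selection
theorem pv_sel_eq (results : List (List (String × String))) :
    ∀ (ref_ids : List String),
      pvSelA results ref_ids = (results.foldl (pvBStep ref_ids) none).map Prod.snd := by
  intro ref_ids
  induction ref_ids with
  | nil => rw [pv_fold_nil_ref]; rfl
  | cons rid rest ih =>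
    have h := pv_inv_fold rid rest results none none none (by rfl)
    unfold pvSelA
    unfold pvInv at h
    cases hs : results.foldl (pvScanStep rid) none with
    | some r =>
      rw [hs] at h
      rw [h]
      rfl
    | none =>
      rw [hs] at h
      rw [h, ih]
      cases results.foldl (pvBStep rest) none with
      | none => rfl
      | some pr => rfl

-- A = B everywhere
theorem pv_main (ref_ids : List String) (results : List (List (String × String))) :
    chunk_ids_to_sources_flat_py ref_ids results = chunk_ids_to_sources_flat_py_alt ref_ids results := by
  rw [pv_A_eq_selA]
  unfold chunk_ids_to_sources_flat_py_alt
  rw [pv_sel_eq]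
  cases results.foldl (pvBStep ref_ids) none with
  | none => rfl
  | some pr => rfl

-- ===== VERDICT =====
theorem chunk_ids_to_sources_flat_py_spec : Claim_equal_chunk_ids_to_sources_flat_py := by
  intro ref_ids results _ _
  exact pv_main ref_ids results
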